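-- pv_equiv track=rewrite | github.com/CYL-Mark/home-assistant-cyktek_gateway | custom_components/cyltek_gateway/cyltek/util.py | decode16bit
-- ===== SOURCE A (Python) =====
-- def decode16bit(z, mask):
--     """decode 16 bit for daikin register data"""
--     def shift(b):
--         if (b == 0x0):
--             return 0
--         move = 0
--         while(b):
--             if ((b+1) >> 1) != (b >> 1):
--                 break
--             b = b >> 1
--             move+=1
--         return move
--     return (z & mask) >> shift(mask)
-- ===== SOURCE B (Python) =====
-- def decode16bit(z, mask):
--     """decode 16 bit for daikin register data"""
--     if mask == 0:
--         return z & mask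
--     low = mask & -mask          # lowest set bit of mask (works for negative masks too)
--     return (z & mask) >> (low.bit_length() - 1)
-- ===== Notes on version B (the rewrite author's own statement) =====
-- stated objective: idiomatic
-- what changed: The bit-at-a-time while loop that counts the mask's trailing zeros is replaced by the closed form (mask & -mask).bit_length() - 1 (lowest set bit, then its position), guarded by mask == 0.
import Mathlib
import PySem

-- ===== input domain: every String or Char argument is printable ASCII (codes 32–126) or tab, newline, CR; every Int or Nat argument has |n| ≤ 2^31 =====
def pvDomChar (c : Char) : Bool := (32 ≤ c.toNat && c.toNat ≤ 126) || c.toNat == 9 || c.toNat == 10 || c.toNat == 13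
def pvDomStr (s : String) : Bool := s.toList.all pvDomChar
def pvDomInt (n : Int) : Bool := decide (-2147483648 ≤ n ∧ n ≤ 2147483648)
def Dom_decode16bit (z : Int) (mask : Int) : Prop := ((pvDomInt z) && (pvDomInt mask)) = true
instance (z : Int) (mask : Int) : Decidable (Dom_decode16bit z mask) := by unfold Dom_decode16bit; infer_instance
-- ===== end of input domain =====

-- B replaces A's trailing-zero-counting while loop by the closed form (mask & -mask).bit_length() - 1 (idiomatic; not measured faster).

-- ===== PORT A =====
-- the `while(b)` loop of the inner helper `shift`: state (b, move)
def pvShiftLoop (b : Int) (move : Nat) : Nat :=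
  if _hb : b = 0 then move
  else if _hc : (b + 1) >>> (1:Nat) ≠ b >>> (1:Nat) then move
  else pvShiftLoop (b >>> (1:Nat)) (move + 1)
termination_by b.natAbs
decreasing_by
  rw [not_not] at _hc
  have h1 : b >>> (1:Nat) = b / 2 := by simp [Int.shiftRight_eq_div_pow]
  have h2 : (b + 1) >>> (1:Nat) = (b + 1) / 2 := by simp [Int.shiftRight_eq_div_pow]
  rw [h1]; rw [h1, h2] at _hc
  omega

-- the inner helper `shift`
def pvShift (b : Int) : Nat :=
  if b = 0 then 0 else pvShiftLoop b 0

def decode16bit (z : Int) (mask : Int) : Int :=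
  (PySem.Int.band z mask) >>> pvShift mask

-- ===== PORT B =====
def decode16bit_alt (z : Int) (mask : Int) : Int :=
  if mask = 0 then PySem.Int.band z mask
  else
    let low := PySem.Int.band mask (-mask)
    (PySem.Int.band z mask) >>> (PySem.Int.bitLength low - 1)

-- ===== PRECONDITION & SPEC =====
def Spec_decode16bit (z : Int) (mask : Int) (out : Int) : Prop := out = decode16bit_alt z mask
instance (z : Int) (mask : Int) (out : Int) : Decidable (Spec_decode16bit z mask out) := by unfold Spec_decode16bit; infer_instance

-- ===== CLAIM (what is proved, stated in full; the proofs are below) =====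
def Claim_equal_decode16bit : Prop := ∀ (z : Int) (mask : Int), Dom_decode16bit z mask → Spec_decode16bit z mask (decode16bit z mask)

-- ===== LEMMAS AND PROOFS =====

-- n - (n &&& (n-1)) is the lowest set bit, on Nat
-- odd n: n &&& (n-1) = n-1
theorem pv_and_pred_odd (k : Nat) : (2 * k + 1) &&& (2 * k) = 2 * k := by
  apply Nat.eq_of_testBit_eq; intro i
  cases i with
  | zero => simp [Nat.testBit_zero]
  | succ j =>
      have h1 : (2 * k + 1) / 2 = k := by omega
      have h2 : (2 * k) / 2 = k := by omega
      rw [Nat.testBit_land]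
      simp [Nat.testBit_add_one, h1, h2]

-- even n = 2k (k ≥ 1): (2k) &&& (2k-1) = 2 * (k &&& (k-1))
theorem pv_and_pred_even (k : Nat) (_hk : k ≠ 0) :
    (2 * k) &&& (2 * k - 1) = 2 * (k &&& (k - 1)) := by
  apply Nat.eq_of_testBit_eq; intro i
  cases i with
  | zero =>
      rw [Nat.testBit_land]
      simp [Nat.testBit_zero, Nat.mul_mod_right]
  | succ j =>
      have h1 : (2 * k) / 2 = k := by omega
      have h2 : (2 * k - 1) / 2 = k - 1 := by omega
      have h3 : (2 * (k &&& (k - 1))) / 2 = k &&& (k - 1) := by omega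
      rw [Nat.testBit_land]
      simp [Nat.testBit_add_one, h1, h2, h3]

def pvLow (n : Nat) : Nat := n - (n &&& (n - 1))

theorem pvLow_pos (n : Nat) (h : n ≠ 0) : 0 < pvLow n := by
  have := Nat.and_le_right (n := n) (m := n - 1)
  unfold pvLow; omega

theorem pvLow_odd (n : Nat) (h : n % 2 = 1) : pvLow n = 1 := by
  obtain ⟨k, rfl⟩ : ∃ k, n = 2 * k + 1 := ⟨n / 2, by omega⟩
  unfold pvLow
  rw [show 2 * k + 1 - 1 = 2 * k by omega, pv_and_pred_odd]
  omega

theorem pvLow_even (n : Nat) (h : n % 2 = 0) (h0 : n ≠ 0) :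
    pvLow n = 2 * pvLow (n / 2) := by
  obtain ⟨k, rfl⟩ : ∃ k, n = 2 * k := ⟨n / 2, by omega⟩
  unfold pvLow
  rw [pv_and_pred_even k (by omega), show 2 * k / 2 = k by omega]
  have := Nat.and_le_right (n := k) (m := k - 1)
  omega

-- band b (-b) is the lowest set bit of |b|
theorem pv_band_neg_self (b : Int) (hb : b ≠ 0) :
    PySem.Int.band b (-b) = ((pvLow b.natAbs : Nat) : Int) := by
  unfold PySem.Int.band pvLow
  rcases lt_trichotomy b 0 with h | h | h
  · have h1 : ¬ (0 ≤ b) := by omega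
    have h2 : (0 : Int) ≤ -b := by omega
    simp only [h1, h2, if_false, if_pos]
    congr 2
    · omega
    · congr 1 <;> omega
  · exact absurd h hb
  · have h1 : (0 : Int) ≤ b := by omega
    have h2 : ¬ ((0 : Int) ≤ -b) := by omega
    simp only [h1, h2, if_false, if_pos]
    congr 2
    · omega
    · congr 1 <;> omega

-- the loop computes bitLength (band b (-b)) - 1 added to move
theorem pvShiftLoop_eq (N : Nat) : ∀ (b : Int), b.natAbs ≤ N → b ≠ 0 → ∀ (move : Nat),
    pvShiftLoop b move = move + (PySem.Int.bitLength (PySem.Int.band b (-b)) - 1) := by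
  induction N with
  | zero => intro b h1 h2; omega
  | succ N ih =>
      intro b h1 h2 move
      rw [pv_band_neg_self b h2]
      have hdiv : (b + 1) >>> (1:Nat) = (b + 1) / 2 ∧ b >>> (1:Nat) = b / 2 := by
        constructor <;> (rw [Int.shiftRight_eq_div_pow]; norm_num)
      by_cases hpar : b % 2 = 0
      · -- even: loop iterates
        have hcond : ¬ ((b + 1) >>> (1:Nat) ≠ b >>> (1:Nat)) := by
          rw [hdiv.1, hdiv.2]; omega
        rw [pvShiftLoop]
        rw [dif_neg h2, dif_neg hcond]
        have hb2 : (b >>> (1:Nat)) ≠ 0 := by rw [hdiv.2]; omega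
        have hle : (b >>> (1:Nat)).natAbs ≤ N := by rw [hdiv.2]; omega
        rw [ih (b >>> (1:Nat)) hle hb2 (move + 1), pv_band_neg_self _ hb2]
        have hnat : (b >>> (1:Nat)).natAbs = b.natAbs / 2 := by rw [hdiv.2]; omega
        rw [hnat]
        have hval : pvLow b.natAbs = 2 * pvLow (b.natAbs / 2) := by
          apply pvLow_even <;> omega
        have hpos : 0 < pvLow (b.natAbs / 2) := pvLow_pos _ (by omega)
        have hbl : PySem.Int.bitLength ((pvLow b.natAbs : Nat) : Int)
             = PySem.Int.bitLength ((pvLow (b.natAbs / 2) : Nat) : Int) + 1 := by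
          rw [hval, PySem.Int.bitLength_natCast (by omega)]
          congr 2
          omega
        rw [hbl]
        have hbl1 : 1 ≤ PySem.Int.bitLength ((pvLow (b.natAbs / 2) : Nat) : Int) := by
          have h2p := PySem.Int.two_pow_bitLength_le ((pvLow (b.natAbs / 2) : Nat) : Int)
            (by simp; omega)
          by_contra hc
          have hz : PySem.Int.bitLength ((pvLow (b.natAbs / 2) : Nat) : Int) = 0 := by omega
          have := PySem.Int.lt_two_pow_bitLength ((pvLow (b.natAbs / 2) : Nat) : Int)
          rw [hz] at this
          simp at this
          omega
        omega
      · -- odd: loop breaks immediately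
        have hcond : (b + 1) >>> (1:Nat) ≠ b >>> (1:Nat) := by
          rw [hdiv.1, hdiv.2]; omega
        rw [pvShiftLoop]
        rw [dif_neg h2, dif_pos hcond]
        have : pvLow b.natAbs = 1 := pvLow_odd _ (by omega)
        rw [this]
        have : PySem.Int.bitLength ((1 : Nat) : Int) = 1 := by decide
        simp only [Nat.cast_one] at this ⊢
        rw [this]
        omega

-- ===== VERDICT (by name: the statement is the Claim_ definition above) =====
theorem decode16bit_spec : Claim_equal_decode16bit := by
  unfold Claim_equal_decode16bit Spec_decode16bit decode16bit decode16bit_alt pvShift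
  intro z mask _
  by_cases hm : mask = 0
  · simp [hm]
  · rw [if_neg hm, if_neg hm]
    rw [pvShiftLoop_eq mask.natAbs mask le_rfl hm 0, Nat.zero_add]
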